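-- pv_equiv track=rewrite | github.com/agpar/multifacet_trust | src/tools/user_reviews.py | _linear_dupe_removal
-- ===== SOURCE A (Python) =====
-- def _linear_dupe_removal(reviews):
--     """Return only the latest review for each item
--
--     I tried to make this fast, but in retrospect it probably
--     doesn't matter since the average user probably has <100
--     reviews
--     """
--     i = 0
--     deduped_reviews = []
--     current_item = reviews[0]['business_id']
--     latest_review_for_item = reviews[0]
--     while i < len(reviews) - 1:
--         next_review = reviews[i + 1]
--         if (next_review['business_id'] < current_item):
--             raise Exception("Reviews must be sorted by business_id")
--
--         if next_review['business_id'] == current_item: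
--             if next_review['date'] > latest_review_for_item['date']:
--                 latest_review_for_item = next_review
--         else:
--             deduped_reviews.append(latest_review_for_item)
--             current_item = next_review['business_id']
--             latest_review_for_item = next_review
--         i += 1
--     deduped_reviews.append(latest_review_for_item)
--     return deduped_reviews
-- ===== SOURCE B (Python) =====
-- def _linear_dupe_removal(reviews):
--     """Return only the latest review for each item.
--
--     One pass with a dict keyed by business_id: keep the review with
--     the strictly greatest date per id (first one wins ties), then
--     return the winners in first-appearance order.
--     """
--     best = {}
--     for r in reviews:
--         b = r['business_id']
--         if b not in best or r['date'] > best[b]['date']: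
--             best[b] = r
--     return list(best.values())
-- ===== Notes on version B (the rewrite author's own statement) =====
-- stated objective: idiomatic
-- what changed: Replaces the index-driven while loop with explicit current-group state (current id, running winner, sortedness check) by the standard one-pass 'best per key' dict idiom whose insertion order yields the group order; the sortedness check disappears because unsorted inputs (on which A raises) are outside Pre_.
import Mathlib
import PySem

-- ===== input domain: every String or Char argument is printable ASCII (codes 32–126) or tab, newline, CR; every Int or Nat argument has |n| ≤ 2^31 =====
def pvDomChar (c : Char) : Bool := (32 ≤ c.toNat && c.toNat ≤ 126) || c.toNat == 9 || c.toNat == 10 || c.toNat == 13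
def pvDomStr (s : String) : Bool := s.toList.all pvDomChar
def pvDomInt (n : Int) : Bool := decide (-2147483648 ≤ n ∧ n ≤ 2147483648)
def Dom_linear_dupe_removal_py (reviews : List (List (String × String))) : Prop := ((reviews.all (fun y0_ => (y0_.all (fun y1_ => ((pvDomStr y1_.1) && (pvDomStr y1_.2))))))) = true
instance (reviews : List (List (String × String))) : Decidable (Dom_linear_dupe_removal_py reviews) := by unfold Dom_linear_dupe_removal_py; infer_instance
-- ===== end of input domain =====

-- B replaces A's index-driven while loop (explicit current-group state plus a sortedness check)
-- by the idiomatic one-pass "best review per business_id" dict whose insertion order gives the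
-- group order; equivalence is proved on sorted, non-empty inputs with the needed keys (Pre_).


-- shared helpers: a review is a dict[str,str]; r['business_id'] / r['date'] (first-match lookup;
-- the "" default is never reached on Pre_, where the keys are present wherever they are read)
def pvBid (r : List (String × String)) : String := (PySem.Dict.mk r).getD "business_id" ""
def pvDate (r : List (String × String)) : String := (PySem.Dict.mk r).getD "date" ""
def pvHasKey (r : List (String × String)) (k : String) : Bool := (PySem.Dict.mk r).contains k

-- ===== PORT A =====
-- the while loop over i (next_review = reviews[i+1], i.e. over the tail), with state
-- (current_item, latest_review_for_item, deduped_reviews)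
def goA (rest : List (List (String × String))) (current : String)
    (latest : List (String × String)) (acc : List (List (String × String))) :
    List (List (String × String)) :=
  match rest with
  | [] => acc ++ [latest]
  | next :: rest' =>
    -- Python str '<' is code-point lexicographic = Lean '<' on .toList (PySem.Chars doc)
    if (pvBid next).toList < current.toList then acc ++ [latest]  -- Python: raise Exception (outside Pre_; value irrelevant)
    else if pvBid next = current then
      if (pvDate latest).toList < (pvDate next).toList then goA rest' current next acc
      else goA rest' current latest acc
    else goA rest' (pvBid next) next (acc ++ [latest])

def linear_dupe_removal_py (reviews : List (List (String × String))) : List (List (String × String)) :=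
  match reviews with
  | [] => []  -- Python: reviews[0] raises IndexError (outside Pre_; value irrelevant)
  | r0 :: rest => goA rest (pvBid r0) r0 []

-- ===== PORT B =====
-- one fold building best : dict[str, review]; `b not in best or r['date'] > best[b]['date']`
def pvStepB (best : PySem.Dict String (List (String × String))) (r : List (String × String)) :
    PySem.Dict String (List (String × String)) :=
  match best.get? (pvBid r) with
  | none => best.insert (pvBid r) r
  | some cur => if (pvDate cur).toList < (pvDate r).toList then best.insert (pvBid r) r else best

def linear_dupe_removal_py_alt (reviews : List (List (String × String))) : List (List (String × String)) :=
  (reviews.foldl pvStepB PySem.Dict.empty).values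

-- ===== PRECONDITION & SPEC =====
-- Pre_ = exactly the inputs on which Python A returns: reviews non-empty, every review has a
-- 'business_id', the list is sorted (non-decreasing) by business_id, and every review adjacent to
-- one with the same business_id has a 'date' (A reads dates only inside a run of equal ids).
def Pre_linear_dupe_removal_py (reviews : List (List (String × String))) : Prop :=
  reviews ≠ [] ∧
  (∀ r ∈ reviews, pvHasKey r "business_id" = true) ∧
  List.IsChain (fun a b => (pvBid a).toList ≤ (pvBid b).toList) reviews ∧
  List.IsChain (fun a b => pvBid a = pvBid b → pvHasKey a "date" = true ∧ pvHasKey b "date" = true) reviews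
instance (reviews : List (List (String × String))) : Decidable (Pre_linear_dupe_removal_py reviews) := by
  unfold Pre_linear_dupe_removal_py; infer_instance

def pvWitness_linear_dupe_removal_py : (List (List (String × String))) :=
  [[("business_id", "a"), ("date", "2019-01-01")],
   [("business_id", "a"), ("date", "2019-02-01")],
   [("business_id", "b"), ("date", "2018-01-01")]]

def Spec_linear_dupe_removal_py (reviews : List (List (String × String))) (out : List (List (String × String))) : Prop := out = linear_dupe_removal_py_alt reviews
instance (reviews : List (List (String × String))) (out : List (List (String × String))) : Decidable (Spec_linear_dupe_removal_py reviews out) := by unfold Spec_linear_dupe_removal_py; infer_instance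

-- ===== CLAIM (what is proved, stated in full; the proofs are below) =====
def Claim_equal_linear_dupe_removal_py : Prop := ∀ (reviews : List (List (String × String))), Dom_linear_dupe_removal_py reviews → Pre_linear_dupe_removal_py reviews → Spec_linear_dupe_removal_py reviews (linear_dupe_removal_py reviews)

-- ===== LEMMAS AND PROOFS =====

-- unfolding equations for the two loop bodies (match/if reductions, all rfl)
lemma goA_nil (c : String) (l : List (String × String)) (a : List (List (String × String))) :
    goA [] c l a = a ++ [l] := rfl

lemma goA_cons (next : List (String × String)) (rest' : List (List (String × String)))
    (c : String) (l : List (String × String)) (a : List (List (String × String))) :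
    goA (next :: rest') c l a =
      if (pvBid next).toList < c.toList then a ++ [l]
      else if pvBid next = c then
        if (pvDate l).toList < (pvDate next).toList then goA rest' c next a else goA rest' c l a
      else goA rest' (pvBid next) next (a ++ [l]) := rfl

lemma pvStepB_none (best : PySem.Dict String (List (String × String))) (r : List (String × String))
    (h : best.get? (pvBid r) = none) : pvStepB best r = best.insert (pvBid r) r := by
  unfold pvStepB; rw [h]

lemma pvStepB_some (best : PySem.Dict String (List (String × String))) (r cur : List (String × String))
    (h : best.get? (pvBid r) = some cur) :
    pvStepB best r = if (pvDate cur).toList < (pvDate r).toList then best.insert (pvBid r) r else best := by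
  unfold pvStepB; rw [h]

-- first-match lookup skips an association-list prefix whose keys all differ from x
lemma get?_mk_append_of_ne (l1 l2 : List (String × List (String × String))) (x : String)
    (h : ∀ p ∈ l1, p.1 ≠ x) :
    (PySem.Dict.mk (l1 ++ l2)).get? x = (PySem.Dict.mk l2).get? x := by
  induction l1 with
  | nil => rfl
  | cons p l1 ih =>
    rw [List.cons_append, PySem.Dict.get?_mk_cons]
    have hp : p.1 ≠ x := h p (List.mem_cons_self ..)
    simp only [beq_iff_eq, hp, if_false]
    exact ih (fun q hq => h q (List.mem_cons_of_mem _ hq))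

-- loop invariant: B's fold, started from the dict holding the finished winners `acc` and the
-- current group's running winner `latest` (keys strictly increasing), computes A's loop
lemma foldl_eq_goA (rest : List (List (String × String))) :
    ∀ (latest : List (String × String)) (acc : List (List (String × String))),
    List.IsChain (fun a b => (pvBid a).toList ≤ (pvBid b).toList) (latest :: rest) →
    List.Pairwise (fun a b => a.toList < b.toList) ((acc ++ [latest]).map pvBid) →
    (rest.foldl pvStepB (PySem.Dict.mk ((acc ++ [latest]).map (fun r => (pvBid r, r))))).values
      = goA rest (pvBid latest) latest acc := by
  induction rest with
  | nil =>
    intro latest acc _ _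
    simp [goA_nil, PySem.Dict.values, List.map_map, Function.comp_def]
  | cons next rest' ih =>
    intro latest acc hchain hpw
    have hle : (pvBid latest).toList ≤ (pvBid next).toList := (List.isChain_cons_cons.mp hchain).1
    have hchain' : List.IsChain (fun a b => (pvBid a).toList ≤ (pvBid b).toList) (next :: rest') :=
      (List.isChain_cons_cons.mp hchain).2
    have hnotlt : ¬ (pvBid next).toList < (pvBid latest).toList := not_lt.mpr hle
    have hacc : ∀ r ∈ acc, (pvBid r).toList < (pvBid latest).toList := by
      intro r hr
      have h2 : List.Pairwise (fun a b : String => a.toList < b.toList)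
          ((acc.map pvBid) ++ ([latest].map pvBid)) := by
        rw [← List.map_append]; exact hpw
      exact (List.pairwise_append.mp h2).2.2 _ (List.mem_map_of_mem hr) _ (by simp)
    have haccne : ∀ r ∈ acc, pvBid r ≠ pvBid next := by
      intro r hr h
      have := hacc r hr
      rw [h] at this
      exact absurd (this.trans_le hle) (lt_irrefl _)
    rcases eq_or_lt_of_le hle with heqL | hlt
    · -- same group: first match in the dict is the running winner `latest`
      have heq : pvBid latest = pvBid next := String.toList_inj.mp heqL
      have hget : (PySem.Dict.mk ((acc ++ [latest]).map (fun r => (pvBid r, r)))).get? (pvBid next)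
          = some latest := by
        rw [List.map_append, get?_mk_append_of_ne]
        · simp [PySem.Dict.get?_mk_cons, heq]
        · intro p hp
          rcases List.mem_map.mp hp with ⟨r, hr, rfl⟩
          exact haccne r hr
      have hcont : (PySem.Dict.mk ((acc ++ [latest]).map (fun r => (pvBid r, r)))).contains (pvBid next) = true := by
        rw [PySem.Dict.contains_eq_isSome_get?, hget]; rfl
      by_cases hd : (pvDate latest).toList < (pvDate next).toList
      · -- overwrite in place: the last pair (pvBid latest, latest) becomes (pvBid next, next)
        have hstep : pvStepB (PySem.Dict.mk ((acc ++ [latest]).map (fun r => (pvBid r, r)))) next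
            = PySem.Dict.mk ((acc ++ [next]).map (fun r => (pvBid r, r))) := by
          rw [pvStepB_some _ _ _ hget, if_pos hd]
          apply PySem.Dict.ext
          rw [PySem.Dict.items_insert_of_contains _ _ hcont]
          show ((acc ++ [latest]).map (fun r => (pvBid r, r))).map _
              = (acc ++ [next]).map (fun r => (pvBid r, r))
          rw [List.map_append, List.map_append, List.map_append, List.map_map, List.map_map]
          congr 1
          · refine List.map_congr_left (fun r hr => ?_)
            have hner : pvBid r ≠ pvBid next := haccne r hr
            simp [hner]
          · simp [← heq]
        have hmapeq : (acc ++ [next]).map pvBid = (acc ++ [latest]).map pvBid := by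
          simp [← heq]
        rw [List.foldl_cons, hstep, ih next acc hchain' (hmapeq ▸ hpw)]
        rw [goA_cons, if_neg hnotlt, if_pos heq.symm, if_pos hd, heq]
      · -- keep the running winner
        have hstep : pvStepB (PySem.Dict.mk ((acc ++ [latest]).map (fun r => (pvBid r, r)))) next
            = PySem.Dict.mk ((acc ++ [latest]).map (fun r => (pvBid r, r))) := by
          rw [pvStepB_some _ _ _ hget, if_neg hd]
        have hchain'' : List.IsChain (fun a b => (pvBid a).toList ≤ (pvBid b).toList) (latest :: rest') := by
          cases rest' with
          | nil => exact List.IsChain.singleton latest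
          | cons y t =>
            exact List.isChain_cons_cons.mpr
              ⟨heqL ▸ (List.isChain_cons_cons.mp hchain').1, (List.isChain_cons_cons.mp hchain').2⟩
        rw [List.foldl_cons, hstep, ih latest acc hchain'' hpw]
        rw [goA_cons, if_neg hnotlt, if_pos heq.symm, if_neg hd]
    · -- new group: pvBid next is a fresh key, so the insert appends
      have hall : ∀ p ∈ (acc ++ [latest]).map (fun r => (pvBid r, r)), p.1 ≠ pvBid next := by
        intro p hp
        rcases List.mem_map.mp hp with ⟨r, hr, rfl⟩
        rcases List.mem_append.mp hr with hr | hr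
        · intro h; exact absurd (h ▸ (hacc r hr).trans hlt) (lt_irrefl _)
        · simp at hr; subst hr; intro h; exact absurd (h ▸ hlt) (lt_irrefl _)
      have hget : (PySem.Dict.mk ((acc ++ [latest]).map (fun r => (pvBid r, r)))).get? (pvBid next)
          = none := by
        have h0 := get?_mk_append_of_ne ((acc ++ [latest]).map (fun r => (pvBid r, r))) [] (pvBid next) hall
        simpa using h0
      have hcont : (PySem.Dict.mk ((acc ++ [latest]).map (fun r => (pvBid r, r)))).contains (pvBid next) = false := by
        rw [PySem.Dict.contains_eq_isSome_get?, hget]; rfl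
      have hstep : pvStepB (PySem.Dict.mk ((acc ++ [latest]).map (fun r => (pvBid r, r)))) next
          = PySem.Dict.mk (((acc ++ [latest]) ++ [next]).map (fun r => (pvBid r, r))) := by
        rw [pvStepB_none _ _ hget]
        apply PySem.Dict.ext
        rw [PySem.Dict.items_insert_of_not_contains _ _ hcont]
        show ((acc ++ [latest]).map (fun r => (pvBid r, r))) ++ _ = _
        simp
      have hpw' : List.Pairwise (fun a b : String => a.toList < b.toList)
          (((acc ++ [latest]) ++ [next]).map pvBid) := by
        rw [List.map_append, List.pairwise_append]
        refine ⟨hpw, by simp, ?_⟩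
        intro a ha b hb
        simp at hb; subst hb
        rcases List.mem_map.mp ha with ⟨r, hr, rfl⟩
        rcases List.mem_append.mp hr with hr | hr
        · exact (hacc r hr).trans hlt
        · simp at hr; subst hr; exact hlt
      rw [List.foldl_cons, hstep, ih next (acc ++ [latest]) hchain' hpw']
      have hne : ¬ pvBid next = pvBid latest := by
        intro h; exact absurd (h ▸ hlt) (lt_irrefl _)
      rw [goA_cons, if_neg hnotlt, if_neg hne]

-- ===== VERDICT (by name: the statement is the Claim_ definition above) =====
theorem linear_dupe_removal_py_spec : Claim_equal_linear_dupe_removal_py := by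
  intro reviews _ hpre
  obtain ⟨hne, _, hsorted, _⟩ := hpre
  unfold Spec_linear_dupe_removal_py
  cases reviews with
  | nil => exact absurd rfl hne
  | cons r0 rest =>
    have h1 := foldl_eq_goA rest r0 [] hsorted (by simp)
    simp only [linear_dupe_removal_py, linear_dupe_removal_py_alt, List.foldl_cons]
    rw [show pvStepB PySem.Dict.empty r0 = PySem.Dict.mk (([] ++ [r0]).map (fun r => (pvBid r, r))) from rfl]
    exact h1.symm
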